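-- pv_equiv track=rewrite | github.com/arabidopsis/footprint | footprint/web/typing.py | get_serializer
-- ===== SOURCE A (Python) =====
-- import typing as t
--
-- def get_serializer(typ: str) -> t.Optional[str]:
--     if typ in {"string", "number"}:
--         return None
--     if typ.endswith("[]"):
--         s = get_serializer(typ[:-2])
--         if s is None:
--             return None
--         return s + "[]"
--
--     return f"{typ}_serializer"
-- ===== SOURCE B (Python) =====
-- import typing as t
--
-- def get_serializer(typ: str) -> t.Optional[str]:
--     # Iterative: strip all trailing "[]" pairs while counting them, then decide once on the base.
--     count = 0
--     base = typ
--     while base.endswith("[]"):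
--         base = base[:-2]
--         count += 1
--     if base in {"string", "number"}:
--         return None
--     return base + "_serializer" + "[]" * count
-- ===== Notes on version B (the rewrite author's own statement) =====
-- stated objective: alternative
-- what changed: Replaces A's recursion (one recursive call per trailing bracket pair, with None propagated back up) by a single while loop that strips and counts the trailing bracket pairs, then builds the answer once from the base string.
import Mathlib
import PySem

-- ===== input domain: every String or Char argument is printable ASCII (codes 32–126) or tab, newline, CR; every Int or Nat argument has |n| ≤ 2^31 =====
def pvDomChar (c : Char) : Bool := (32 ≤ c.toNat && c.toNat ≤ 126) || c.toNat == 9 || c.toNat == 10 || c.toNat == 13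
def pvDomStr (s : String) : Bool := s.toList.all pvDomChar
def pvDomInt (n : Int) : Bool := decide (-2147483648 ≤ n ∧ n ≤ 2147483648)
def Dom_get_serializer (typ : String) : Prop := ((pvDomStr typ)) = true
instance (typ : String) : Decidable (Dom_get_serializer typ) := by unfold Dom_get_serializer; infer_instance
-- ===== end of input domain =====

-- B replaces A's per-bracket recursion by one loop that strips and counts the trailing bracket pairs (alternative decomposition, same cost).

-- termination helper: stripping a trailing "[]" shortens the string (cited by both ports' decreasing_by)
theorem pvStripLt (cs : List Char) (h : PySem.Chars.endswith cs "[]".toList = true) :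
    (PySem.List.slice cs none (some (-2))).length < cs.length := by
  have hsuf : "[]".toList <:+ cs := (PySem.Chars.endswith_iff cs _).mp h
  have hlen : 2 ≤ cs.length := by simpa using hsuf.length_le
  rw [PySem.List.slice_to_neg_ofNat cs 2 (by omega)]
  simp [List.length_take]
  omega

-- ===== PORT A =====
-- A over List Char: the recursion of Source A, step for step
def getSerACore (cs : List Char) : Option (List Char) :=
  if cs = "string".toList ∨ cs = "number".toList then none
  else if h : PySem.Chars.endswith cs "[]".toList = true then
    match getSerACore (PySem.Chars.slice cs none (some (-2))) with
    | none => none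
    | some s => some (s ++ "[]".toList)
  else some (cs ++ "_serializer".toList)
termination_by cs.length
decreasing_by simpa using pvStripLt cs h

def get_serializer (typ : String) : Option String :=
  (getSerACore typ.toList).map String.ofList

-- ===== PORT B =====
-- B's while loop: strip trailing "[]" pairs, counting them
def stripBrackets (cs : List Char) (count : Nat) : List Char × Nat :=
  if h : PySem.Chars.endswith cs "[]".toList = true then
    stripBrackets (PySem.Chars.slice cs none (some (-2))) (count + 1)
  else (cs, count)
termination_by cs.length
decreasing_by simpa using pvStripLt cs h

def get_serializer_alt (typ : String) : Option String :=
  let p := stripBrackets typ.toList 0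
  if p.1 = "string".toList ∨ p.1 = "number".toList then none
  else some (String.ofList (p.1 ++ "_serializer".toList ++ (List.replicate p.2 "[]".toList).flatten))

-- ===== PRECONDITION & SPEC =====
def Spec_get_serializer (typ : String) (out : Option String) : Prop := out = get_serializer_alt typ
instance (typ : String) (out : Option String) : Decidable (Spec_get_serializer typ out) := by unfold Spec_get_serializer; infer_instance

-- ===== CLAIM (what is proved, stated in full; the proofs are below) =====
def Claim_equal_get_serializer : Prop := ∀ (typ : String), Dom_get_serializer typ → Spec_get_serializer typ (get_serializer typ)

-- ===== LEMMAS AND PROOFS =====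

-- the accumulator only shifts the count
theorem stripBrackets_shift (cs : List Char) (k : Nat) :
    stripBrackets cs k = ((stripBrackets cs 0).1, (stripBrackets cs 0).2 + k) := by
  by_cases h : PySem.Chars.endswith cs "[]".toList = true
  · conv_lhs => rw [stripBrackets]
    conv_rhs => rw [stripBrackets]
    simp only [h, dite_true]
    rw [stripBrackets_shift (PySem.Chars.slice cs none (some (-2))) (k + 1),
        stripBrackets_shift (PySem.Chars.slice cs none (some (-2))) 1]
    simp only [Prod.mk.injEq, true_and]
    omega
  · conv_lhs => rw [stripBrackets]
    conv_rhs => rw [stripBrackets]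
    rw [dif_neg h, dif_neg h]
    simp
termination_by cs.length
decreasing_by all_goals simpa using pvStripLt cs h

-- the core equivalence, by the recursion of A
theorem getSerACore_eq (cs : List Char) :
    getSerACore cs =
      (if (stripBrackets cs 0).1 = "string".toList ∨ (stripBrackets cs 0).1 = "number".toList then none
       else some ((stripBrackets cs 0).1 ++ "_serializer".toList ++ (List.replicate (stripBrackets cs 0).2 "[]".toList).flatten)) := by
  by_cases h : PySem.Chars.endswith cs "[]".toList = true
  · have hsn : ¬ (cs = "string".toList ∨ cs = "number".toList) := by
      rintro (rfl | rfl) <;> exact absurd h (by decide)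
    rw [getSerACore, if_neg hsn, dif_pos h,
        getSerACore_eq (PySem.Chars.slice cs none (some (-2)))]
    conv_rhs => rw [stripBrackets, dif_pos h,
        stripBrackets_shift (PySem.Chars.slice cs none (some (-2))) 1]
    split_ifs with hb
    · rfl
    · simp [List.replicate_succ', List.append_assoc]
  · rw [stripBrackets, dif_neg h]
    by_cases hsn : cs = "string".toList ∨ cs = "number".toList
    · rw [getSerACore, if_pos hsn, if_pos hsn]
    · rw [getSerACore, if_neg hsn, dif_neg h, if_neg hsn]
      simp
termination_by cs.length
decreasing_by simpa using pvStripLt cs h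

-- ===== VERDICT (by name: the statement is the Claim_ definition above) =====
theorem get_serializer_spec : Claim_equal_get_serializer := by
  intro typ _
  unfold Spec_get_serializer
  simp only [get_serializer, get_serializer_alt]
  rw [getSerACore_eq]
  by_cases hb : (stripBrackets typ.toList 0).1 = "string".toList ∨ (stripBrackets typ.toList 0).1 = "number".toList
  · rw [if_pos hb, if_pos hb]; rfl
  · rw [if_neg hb, if_neg hb]; rfl
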